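-- pv_equiv track=rewrite | github.com/DanielKisa/aoc2024 | day8/part2.py | get_antinodes_part2
-- ===== SOURCE A (Python) =====
-- def get_antinodes_part2(antenna_positions: list[tuple[int, int]], x_max: int, y_max: int) -> list[tuple[int, int]]:
--     antinode_positions = list()
--     for antenna_1 in antenna_positions:
--         for antenna_2 in antenna_positions:
--             delta_x = antenna_2[0] - antenna_1[0]
--             delta_y = antenna_2[1] - antenna_1[1]
--             if (delta_x == 0 and delta_y == 0):
--                 continue
--             if antenna_1 not in antinode_positions:
--                 antinode_positions.append(antenna_1)
--             potential_antinode = (antenna_1[0] - delta_x, antenna_1[1] - delta_y)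
--             while (0 <= potential_antinode[0] <= x_max) and (0 <= potential_antinode[1] <= y_max):
--                 antinode_positions.append(potential_antinode)
--                 delta_x += antenna_2[0] - antenna_1[0]
--                 delta_y += antenna_2[1] - antenna_1[1]
--                 potential_antinode = (antenna_1[0] - delta_x, antenna_1[1] - delta_y)
--
--     return antinode_positions
-- ===== SOURCE B (Python) =====
-- def _reach(p, s, m):
--     """Largest K>=0 such that 0 <= p - i*s <= m for all i=1..K; None means unbounded."""
--     if s == 0:
--         return None if 0 <= p <= m else 0
--     if not (0 <= p - s <= m):
--         return 0
--     return p // s if s > 0 else (m - p) // (-s)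
--
--
-- def get_antinodes_part2(antenna_positions: list[tuple[int, int]], x_max: int, y_max: int) -> list[tuple[int, int]]:
--     antinode_positions = []
--     for antenna_1 in antenna_positions:
--         for antenna_2 in antenna_positions:
--             dx = antenna_2[0] - antenna_1[0]
--             dy = antenna_2[1] - antenna_1[1]
--             if dx == 0 and dy == 0:
--                 continue
--             if antenna_1 not in antinode_positions:
--                 antinode_positions.append(antenna_1)
--             kx = _reach(antenna_1[0], dx, x_max)
--             ky = _reach(antenna_1[1], dy, y_max)
--             if kx is None:
--                 k = ky
--             elif ky is None:
--                 k = kx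
--             else:
--                 k = min(kx, ky)
--             for i in range(1, k + 1):
--                 antinode_positions.append((antenna_1[0] - i * dx, antenna_1[1] - i * dy))
--     return antinode_positions
-- ===== Notes on version B (the rewrite author's own statement) =====
-- stated objective: alternative
-- what changed: The inner while loop that steps antinode by antinode until leaving the grid is replaced by a closed-form computation of the number K of in-bounds steps (per axis: floor of the available distance over |step|, taking the min), after which the K antinodes are emitted directly; outer pair loops and the membership guard are unchanged.
import Mathlib
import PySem

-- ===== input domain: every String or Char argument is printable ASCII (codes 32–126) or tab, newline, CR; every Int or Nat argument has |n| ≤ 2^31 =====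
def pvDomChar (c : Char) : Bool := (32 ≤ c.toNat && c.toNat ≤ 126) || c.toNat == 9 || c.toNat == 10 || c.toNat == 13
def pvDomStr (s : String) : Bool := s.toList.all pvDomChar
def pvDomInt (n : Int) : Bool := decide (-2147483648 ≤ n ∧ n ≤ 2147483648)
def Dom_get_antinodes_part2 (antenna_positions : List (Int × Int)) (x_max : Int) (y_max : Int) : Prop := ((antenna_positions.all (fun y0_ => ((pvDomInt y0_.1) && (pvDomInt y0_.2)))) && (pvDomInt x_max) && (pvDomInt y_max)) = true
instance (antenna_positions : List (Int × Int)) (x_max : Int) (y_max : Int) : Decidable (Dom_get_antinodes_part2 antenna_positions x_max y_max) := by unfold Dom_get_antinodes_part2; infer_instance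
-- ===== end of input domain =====

-- B replaces A's step-by-step while loop with a closed-form count of in-bounds antinode
-- steps per pair (alternative algorithm for the inner loop; same output, duplicates and order included).

-- ===== PORT A =====

-- bound on the number of loop iterations, used as the totality fuel of whileA
def pvStepMeasure (s v m : Int) : Nat :=
  if 0 < s then v.toNat else if s < 0 then (m - v).toNat else 0

-- A's inner `while` loop, step for step: state (delta_x, delta_y), appending
-- potential_antinode = (x1 - dx, y1 - dy) while in bounds.  The Nat fuel is a
-- totality guard only; the loop lemmas below prove the chosen fuel is never exhausted.
def whileA (fuel : Nat) (x1 y1 bdx bdy x_max y_max dx dy : Int) (acc : List (Int × Int)) : List (Int × Int) :=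
  match fuel with
  | 0 => acc
  | fuel + 1 =>
    if 0 ≤ x1 - dx ∧ x1 - dx ≤ x_max ∧ 0 ≤ y1 - dy ∧ y1 - dy ≤ y_max then
      whileA fuel x1 y1 bdx bdy x_max y_max (dx + bdx) (dy + bdy) (acc ++ [(x1 - dx, y1 - dy)])
    else acc

def get_antinodes_part2 (antenna_positions : List (Int × Int)) (x_max : Int) (y_max : Int) : List (Int × Int) :=
  antenna_positions.foldl (fun acc antenna_1 =>
    antenna_positions.foldl (fun acc antenna_2 =>
      let delta_x := antenna_2.1 - antenna_1.1
      let delta_y := antenna_2.2 - antenna_1.2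
      if delta_x = 0 ∧ delta_y = 0 then acc
      else
        let acc1 := if antenna_1 ∈ acc then acc else acc ++ [antenna_1]
        whileA (pvStepMeasure delta_x (antenna_1.1 - delta_x) x_max +
                pvStepMeasure delta_y (antenna_1.2 - delta_y) y_max + 2)
          antenna_1.1 antenna_1.2 delta_x delta_y x_max y_max delta_x delta_y acc1) acc) []

-- ===== PORT B =====

-- Source B's _reach: largest K ≥ 0 with 0 ≤ p - i*s ≤ m for all i = 1..K; none = unbounded
def pvReach (p s m : Int) : Option Int :=
  if s = 0 then (if 0 ≤ p ∧ p ≤ m then none else some 0)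
  else if ¬(0 ≤ p - s ∧ p - s ≤ m) then some 0
  else if 0 < s then some (PySem.Int.floordiv p s)
  else some (PySem.Int.floordiv (m - p) (-s))

-- Source B's combination of the two axis caps (the none/none case is never reached;
-- its value 0 is a totality default)
def pvKmin : Option Int → Option Int → Int
  | none, ky => ky.getD 0
  | some a, none => a
  | some a, some b => min a b

def get_antinodes_part2_alt (antenna_positions : List (Int × Int)) (x_max : Int) (y_max : Int) : List (Int × Int) :=
  antenna_positions.foldl (fun acc antenna_1 =>
    antenna_positions.foldl (fun acc antenna_2 =>
      let dx := antenna_2.1 - antenna_1.1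
      let dy := antenna_2.2 - antenna_1.2
      if dx = 0 ∧ dy = 0 then acc
      else
        let acc1 := if antenna_1 ∈ acc then acc else acc ++ [antenna_1]
        let k := pvKmin (pvReach antenna_1.1 dx x_max) (pvReach antenna_1.2 dy y_max)
        acc1 ++ (PySem.List.pyRange 1 (k + 1) 1).map
          (fun i => (antenna_1.1 - i * dx, antenna_1.2 - i * dy))) acc) []

-- ===== PRECONDITION & SPEC =====
def Spec_get_antinodes_part2 (antenna_positions : List (Int × Int)) (x_max : Int) (y_max : Int) (out : List (Int × Int)) : Prop := out = get_antinodes_part2_alt antenna_positions x_max y_max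
instance (antenna_positions : List (Int × Int)) (x_max : Int) (y_max : Int) (out : List (Int × Int)) : Decidable (Spec_get_antinodes_part2 antenna_positions x_max y_max out) := by unfold Spec_get_antinodes_part2; infer_instance

-- ===== CLAIM (what is proved, stated in full; the proofs are below) =====
def Claim_equal_get_antinodes_part2 : Prop := ∀ (antenna_positions : List (Int × Int)) (x_max : Int) (y_max : Int), Dom_get_antinodes_part2 antenna_positions x_max y_max → Spec_get_antinodes_part2 antenna_positions x_max y_max (get_antinodes_part2 antenna_positions x_max y_max)

-- ===== LEMMAS AND PROOFS =====

theorem pvReach_none (p s m : Int) (h : pvReach p s m = none) :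
    ∀ k : Int, 0 ≤ p - k * s ∧ p - k * s ≤ m := by
  intro k
  by_cases h1 : s = 0
  · by_cases h2 : 0 ≤ p ∧ p ≤ m
    · subst h1
      simp only [mul_zero, sub_zero]
      exact h2
    · unfold pvReach at h
      rw [if_pos h1, if_neg h2] at h
      simp at h
  · unfold pvReach at h
    rw [if_neg h1] at h
    by_cases h3 : 0 ≤ p - s ∧ p - s ≤ m
    · rw [if_neg (not_not_intro h3)] at h
      by_cases h4 : 0 < s
      · rw [if_pos h4] at h; simp at h
      · rw [if_neg h4] at h; simp at h
    · rw [if_pos h3] at h; simp at h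

theorem pvReach_ne_none (p s m : Int) (hs : s ≠ 0) : pvReach p s m ≠ none := by
  unfold pvReach
  split_ifs <;> simp_all

theorem pvReach_nonneg (p s m c : Int) (h : pvReach p s m = some c) : 0 ≤ c := by
  unfold pvReach at h
  by_cases h1 : s = 0
  · rw [if_pos h1] at h
    by_cases h2 : 0 ≤ p ∧ p ≤ m
    · rw [if_pos h2] at h; simp at h
    · rw [if_neg h2] at h
      injection h with h
      omega
  · rw [if_neg h1] at h
    by_cases h3 : 0 ≤ p - s ∧ p - s ≤ m
    · rw [if_neg (not_not_intro h3)] at h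
      by_cases h4 : 0 < s
      · rw [if_pos h4] at h
        injection h with h
        subst h
        rw [PySem.Int.le_floordiv_iff_mul_le h4]
        simp only [zero_mul]
        omega
      · rw [if_neg h4] at h
        injection h with h
        subst h
        have hneg : 0 < -s := by omega
        rw [PySem.Int.le_floordiv_iff_mul_le hneg]
        simp only [zero_mul]
        omega
    · rw [if_pos h3] at h
      injection h with h
      omega

theorem pvReach_in (p s m c : Int) (h : pvReach p s m = some c) :
    ∀ k : Int, 1 ≤ k → k ≤ c → 0 ≤ p - k * s ∧ p - k * s ≤ m := by
  intro k hk1 hkc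
  unfold pvReach at h
  by_cases h1 : s = 0
  · rw [if_pos h1] at h
    by_cases h2 : 0 ≤ p ∧ p ≤ m
    · rw [if_pos h2] at h; simp at h
    · rw [if_neg h2] at h
      injection h with h
      omega
  · rw [if_neg h1] at h
    by_cases h3 : 0 ≤ p - s ∧ p - s ≤ m
    · rw [if_neg (not_not_intro h3)] at h
      by_cases h4 : 0 < s
      · -- 0 < s, 0 ≤ p - s ≤ m, c = p // s
        rw [if_pos h4] at h
        injection h with h
        subst h
        have hfl : PySem.Int.floordiv p s * s ≤ p ∧ p < (PySem.Int.floordiv p s + 1) * s :=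
          (PySem.Int.floordiv_eq_iff_of_pos h4).mp rfl
        have hks : k * s ≤ PySem.Int.floordiv p s * s :=
          mul_le_mul_of_nonneg_right hkc (le_of_lt h4)
        have hs1 : 1 * s ≤ k * s := mul_le_mul_of_nonneg_right hk1 (le_of_lt h4)
        constructor <;> linarith [h3.1, h3.2, hfl.1]
      · -- s < 0, 0 ≤ p - s ≤ m, c = (m - p) // (-s)
        rw [if_neg h4] at h
        injection h with h
        subst h
        have hneg : 0 < -s := by omega
        have hfl : PySem.Int.floordiv (m - p) (-s) * -s ≤ m - p ∧
            m - p < (PySem.Int.floordiv (m - p) (-s) + 1) * -s :=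
          (PySem.Int.floordiv_eq_iff_of_pos hneg).mp rfl
        have hks : k * -s ≤ PySem.Int.floordiv (m - p) (-s) * -s :=
          mul_le_mul_of_nonneg_right hkc (le_of_lt hneg)
        have hs1 : 1 * -s ≤ k * -s := mul_le_mul_of_nonneg_right hk1 (le_of_lt hneg)
        constructor <;> linarith [h3.1, h3.2, hfl.1]
    · rw [if_pos h3] at h
      injection h with h
      omega

theorem pvReach_out (p s m c : Int) (h : pvReach p s m = some c) :
    ¬(0 ≤ p - (c + 1) * s ∧ p - (c + 1) * s ≤ m) := by
  unfold pvReach at h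
  by_cases h1 : s = 0
  · rw [if_pos h1] at h
    by_cases h2 : 0 ≤ p ∧ p ≤ m
    · rw [if_pos h2] at h; simp at h
    · rw [if_neg h2] at h
      injection h with h
      subst h1
      intro hc
      simp only [mul_zero, sub_zero] at hc
      exact h2 hc
  · rw [if_neg h1] at h
    by_cases h3 : 0 ≤ p - s ∧ p - s ≤ m
    · rw [if_neg (not_not_intro h3)] at h
      by_cases h4 : 0 < s
      · rw [if_pos h4] at h
        injection h with h
        subst h
        have hfl : PySem.Int.floordiv p s * s ≤ p ∧ p < (PySem.Int.floordiv p s + 1) * s :=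
          (PySem.Int.floordiv_eq_iff_of_pos h4).mp rfl
        intro hc
        linarith [hfl.2, hc.1]
      · rw [if_neg h4] at h
        injection h with h
        subst h
        have hneg : 0 < -s := by omega
        have hfl : PySem.Int.floordiv (m - p) (-s) * -s ≤ m - p ∧
            m - p < (PySem.Int.floordiv (m - p) (-s) + 1) * -s :=
          (PySem.Int.floordiv_eq_iff_of_pos hneg).mp rfl
        intro hc
        linarith [hfl.2, hc.2]
    · rw [if_pos h3] at h
      injection h with h
      subst h
      intro hc
      simp only [zero_add, one_mul] at hc
      exact h3 hc

theorem pvKmin_le_left (a : Int) (ky : Option Int) : pvKmin (some a) ky ≤ a := by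
  cases ky with
  | none => exact le_refl a
  | some b => exact min_le_left a b

theorem pvKmin_le_right (kx : Option Int) (b : Int) : pvKmin kx (some b) ≤ b := by
  cases kx with
  | none => simp [pvKmin]
  | some a => exact min_le_right a b

theorem pvKmin_attained (kx ky : Option Int) (h : ¬(kx = none ∧ ky = none)) :
    kx = some (pvKmin kx ky) ∨ ky = some (pvKmin kx ky) := by
  cases kx with
  | none =>
    cases ky with
    | none => exact absurd ⟨rfl, rfl⟩ h
    | some b => right; simp [pvKmin]
  | some a =>
    cases ky with
    | none => left; rfl
    | some b =>
      rcases min_choice a b with hm | hm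
      · left; simp [pvKmin, hm]
      · right; simp [pvKmin, hm]

theorem pvKmin_nonneg (kx ky : Option Int)
    (hx : ∀ a, kx = some a → 0 ≤ a) (hy : ∀ b, ky = some b → 0 ≤ b) :
    0 ≤ pvKmin kx ky := by
  cases kx with
  | none =>
    cases ky with
    | none => simp [pvKmin]
    | some b => simpa [pvKmin] using hy b rfl
  | some a =>
    cases ky with
    | none => exact hx a rfl
    | some b => exact le_min (hx a rfl) (hy b rfl)

-- an axis cap is at most the measure of its first step plus one
theorem pvReach_le (p s m c : Int) (h : pvReach p s m = some c) :
    c ≤ (pvStepMeasure s (p - s) m : Int) + 1 := by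
  have hc0 : 0 ≤ c := pvReach_nonneg p s m c h
  unfold pvReach at h
  by_cases h1 : s = 0
  · rw [if_pos h1] at h
    by_cases h2 : 0 ≤ p ∧ p ≤ m
    · rw [if_pos h2] at h; simp at h
    · rw [if_neg h2] at h
      injection h with h
      omega
  · rw [if_neg h1] at h
    by_cases h3 : 0 ≤ p - s ∧ p - s ≤ m
    · rw [if_neg (not_not_intro h3)] at h
      by_cases h4 : 0 < s
      · rw [if_pos h4] at h
        injection h with h
        subst h
        set c := PySem.Int.floordiv p s with hc
        have hfl : c * s ≤ p ∧ p < (c + 1) * s := (PySem.Int.floordiv_eq_iff_of_pos h4).mp hc.symm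
        rcases le_or_gt c 0 with hle | hgt
        · simp only [pvStepMeasure, if_pos h4]
          omega
        · have h5 : (c - 1) * s ≤ p - s := by nlinarith [hfl.1]
          have h6 : (c - 1) * 1 ≤ (c - 1) * s := by
            exact mul_le_mul_of_nonneg_left (by omega) (by omega)
          have h7 : c ≤ p - s + 1 := by nlinarith
          simp only [pvStepMeasure, if_pos h4]
          omega
      · rw [if_neg h4] at h
        injection h with h
        subst h
        have hneg : 0 < -s := by omega
        set c := PySem.Int.floordiv (m - p) (-s) with hc
        have hfl : c * -s ≤ m - p ∧ m - p < (c + 1) * -s :=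
          (PySem.Int.floordiv_eq_iff_of_pos hneg).mp hc.symm
        rcases le_or_gt c 0 with hle | hgt
        · simp only [pvStepMeasure, if_neg h4, if_pos (by omega : s < 0)]
          omega
        · have h5 : (c - 1) * -s ≤ m - (p - s) := by nlinarith [hfl.1]
          have h6 : (c - 1) * 1 ≤ (c - 1) * -s := by
            exact mul_le_mul_of_nonneg_left (by omega) (by omega)
          have h7 : c ≤ m - (p - s) + 1 := by nlinarith
          simp only [pvStepMeasure, if_neg h4, if_pos (by omega : s < 0)]
          omega
    · rw [if_pos h3] at h
      injection h with h
      omega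

-- A's while loop, started at multiple j with enough fuel, emits exactly the positions
-- for multiples j..K
theorem loop_aux (x1 y1 s t xm ym K : Int)
    (hP1 : ∀ k : Int, 1 ≤ k → k ≤ K →
      0 ≤ x1 - k * s ∧ x1 - k * s ≤ xm ∧ 0 ≤ y1 - k * t ∧ y1 - k * t ≤ ym)
    (hP2 : ¬(0 ≤ x1 - (K + 1) * s ∧ x1 - (K + 1) * s ≤ xm ∧
             0 ≤ y1 - (K + 1) * t ∧ y1 - (K + 1) * t ≤ ym)) :
    ∀ (n : Nat) (j : Int) (acc : List (Int × Int)), 1 ≤ j → j ≤ K + 1 → K + 1 - j ≤ (n : Int) →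
      whileA n x1 y1 s t xm ym (j * s) (j * t) acc =
        acc ++ (PySem.List.pyRange j (K + 1) 1).map (fun i => (x1 - i * s, y1 - i * t)) := by
  intro n
  induction n with
  | zero =>
    intro j acc h1 h2 h3
    have hj : j = K + 1 := by omega
    subst hj
    rw [whileA, PySem.List.pyRange_one_eq_nil (le_refl (K + 1))]
    simp
  | succ n ih =>
    intro j acc h1 h2 h3
    by_cases hj : j = K + 1
    · subst hj
      rw [whileA, if_neg hP2, PySem.List.pyRange_one_eq_nil (le_refl (K + 1))]
      simp
    · have hjK : j ≤ K := by omega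
      have hin := hP1 j h1 hjK
      rw [whileA, if_pos hin]
      have e1 : j * s + s = (j + 1) * s := by ring
      have e2 : j * t + t = (j + 1) * t := by ring
      rw [e1, e2, ih (j + 1) (acc ++ [(x1 - j * s, y1 - j * t)]) (by omega) (by omega)
          (by push_cast at h3 ⊢; omega),
        PySem.List.pyRange_one_cons (by omega : j < K + 1)]
      simp

theorem whileA_closed (x1 y1 s t xm ym : Int) (hst : ¬(s = 0 ∧ t = 0))
    (acc : List (Int × Int)) :
    whileA (pvStepMeasure s (x1 - s) xm + pvStepMeasure t (y1 - t) ym + 2)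
        x1 y1 s t xm ym s t acc =
      acc ++ (PySem.List.pyRange 1 (pvKmin (pvReach x1 s xm) (pvReach y1 t ym) + 1) 1).map
        (fun i => (x1 - i * s, y1 - i * t)) := by
  set K := pvKmin (pvReach x1 s xm) (pvReach y1 t ym) with hK
  have hP3 : 0 ≤ K :=
    pvKmin_nonneg _ _ (fun a ha => pvReach_nonneg _ _ _ _ ha)
      (fun b hb => pvReach_nonneg _ _ _ _ hb)
  have hP1 : ∀ k : Int, 1 ≤ k → k ≤ K →
      0 ≤ x1 - k * s ∧ x1 - k * s ≤ xm ∧ 0 ≤ y1 - k * t ∧ y1 - k * t ≤ ym := by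
    intro k hk1 hkK
    have hx : 0 ≤ x1 - k * s ∧ x1 - k * s ≤ xm := by
      cases hxe : pvReach x1 s xm with
      | none => exact pvReach_none _ _ _ hxe k
      | some a =>
        refine pvReach_in _ _ _ _ hxe k hk1 (le_trans hkK ?_)
        rw [hK, hxe]; exact pvKmin_le_left a _
    have hy : 0 ≤ y1 - k * t ∧ y1 - k * t ≤ ym := by
      cases hye : pvReach y1 t ym with
      | none => exact pvReach_none _ _ _ hye k
      | some b =>
        refine pvReach_in _ _ _ _ hye k hk1 (le_trans hkK ?_)
        rw [hK, hye]; exact pvKmin_le_right _ b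
    exact ⟨hx.1, hx.2, hy.1, hy.2⟩
  have hnn : ¬(pvReach x1 s xm = none ∧ pvReach y1 t ym = none) := by
    rintro ⟨hx, hy⟩
    by_cases hs : s = 0
    · have ht : t ≠ 0 := fun ht => hst ⟨hs, ht⟩
      exact pvReach_ne_none y1 t ym ht hy
    · exact pvReach_ne_none x1 s xm hs hx
  have hP2 : ¬(0 ≤ x1 - (K + 1) * s ∧ x1 - (K + 1) * s ≤ xm ∧
      0 ≤ y1 - (K + 1) * t ∧ y1 - (K + 1) * t ≤ ym) := by
    intro hc
    rcases pvKmin_attained _ _ hnn with hat | hat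
    · exact pvReach_out x1 s xm K (hK ▸ hat) ⟨hc.1, hc.2.1⟩
    · exact pvReach_out y1 t ym K (hK ▸ hat) ⟨hc.2.2.1, hc.2.2.2⟩
  have hKle : K ≤ (pvStepMeasure s (x1 - s) xm : Int) + (pvStepMeasure t (y1 - t) ym : Int) + 1 := by
    rcases pvKmin_attained _ _ hnn with hat | hat
    · have := pvReach_le x1 s xm K (hK ▸ hat)
      have h0 : (0 : Int) ≤ (pvStepMeasure t (y1 - t) ym : Int) := Int.natCast_nonneg _
      omega
    · have := pvReach_le y1 t ym K (hK ▸ hat)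
      have h0 : (0 : Int) ≤ (pvStepMeasure s (x1 - s) xm : Int) := Int.natCast_nonneg _
      omega
  have := loop_aux x1 y1 s t xm ym K hP1 hP2
    (pvStepMeasure s (x1 - s) xm + pvStepMeasure t (y1 - t) ym + 2) 1 acc
    (le_refl 1) (by omega) (by push_cast; omega)
  simpa using this

theorem inner_body_eq (x_max y_max : Int) (antenna_1 : Int × Int)
    (acc : List (Int × Int)) (antenna_2 : Int × Int) :
    (let delta_x := antenna_2.1 - antenna_1.1
     let delta_y := antenna_2.2 - antenna_1.2
     if delta_x = 0 ∧ delta_y = 0 then acc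
     else
       let acc1 := if antenna_1 ∈ acc then acc else acc ++ [antenna_1]
       whileA (pvStepMeasure delta_x (antenna_1.1 - delta_x) x_max +
               pvStepMeasure delta_y (antenna_1.2 - delta_y) y_max + 2)
         antenna_1.1 antenna_1.2 delta_x delta_y x_max y_max delta_x delta_y acc1) =
    (let dx := antenna_2.1 - antenna_1.1
     let dy := antenna_2.2 - antenna_1.2
     if dx = 0 ∧ dy = 0 then acc
     else
       let acc1 := if antenna_1 ∈ acc then acc else acc ++ [antenna_1]
       let k := pvKmin (pvReach antenna_1.1 dx x_max) (pvReach antenna_1.2 dy y_max)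
       acc1 ++ (PySem.List.pyRange 1 (k + 1) 1).map
         (fun i => (antenna_1.1 - i * dx, antenna_1.2 - i * dy))) := by
  by_cases h : antenna_2.1 - antenna_1.1 = 0 ∧ antenna_2.2 - antenna_1.2 = 0
  · simp [h]
  · simp only [if_neg h]
    exact whileA_closed antenna_1.1 antenna_1.2 _ _ x_max y_max h _

-- ===== VERDICT (by name: the statement is the Claim_ definition above) =====
theorem get_antinodes_part2_spec : Claim_equal_get_antinodes_part2 := by
  intro antenna_positions x_max y_max _
  unfold Spec_get_antinodes_part2 get_antinodes_part2 get_antinodes_part2_alt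
  congr 1
  funext acc antenna_1
  congr 1
  funext acc2 antenna_2
  exact inner_body_eq x_max y_max antenna_1 acc2 antenna_2
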